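-- pv_equiv track=rewrite | github.com/beyondthemist/Problem-solving-solution | Programmers/lv.1/140108/solution.py | solution
-- ===== SOURCE A (Python) =====
-- def solution(s):
--     x = s[0]
--
--     answer = 0
--     cnt = [1, 0]
--     for i in range(1, len(s)):
--         if x == 'X':
--             x = s[i]
--             cnt[0], cnt[1] = 0, 0
--
--         cnt[int(s[i] != x)] += 1
--
--         if cnt[0] == cnt[1]:
--             x = 'X'
--             answer += 1
--
--
--     return answer + int(x != 'X')
-- ===== SOURCE B (Python) =====
-- def solution(s):
--     # pass 1: run-length encode s into (char, run length) blocks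
--     runs = []
--     i = 0
--     n = len(s)
--     while i < n:
--         j = i
--         while j < n and s[j] == s[i]:
--             j += 1
--         runs.append((s[i], j - i))
--         i = j
--     # pass 2: arithmetic scan over runs; bal = same-minus-diff of the open
--     # segment (0 means no segment open); a diff-run of length k closes the
--     # segment iff k >= bal, and the k - bal leftover chars open the next one
--     answer = 0
--     bal = 0
--     first = None
--     for ch, k in runs:
--         if bal == 0:
--             first, bal = ch, k
--         elif ch == first:
--             bal += k
--         elif k < bal:
--             bal -= k
--         else:
--             answer += 1
--             if k > bal:
--                 first, bal = ch, k - bal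
--             else:
--                 bal = 0
--     return answer + (1 if bal else 0)
-- ===== Notes on version B (the rewrite author's own statement) =====
-- stated objective: alternative
-- what changed: Replaces A's per-character sentinel balance scan ('X' marker plus a 2-cell cnt list) by a two-stage algorithm: run-length encode the string, then scan the runs with O(1) arithmetic per run (a differing run of length k closes the open segment iff k >= bal, the k-bal leftover opening the next segment), so the balance phase never walks characters one at a time.
-- outside the precondition, e.g. on solution('abX'): A returns 1, B returns 2; on solution('X'): A returns 0, B returns 1
-- crash fix: On the empty string A raises IndexError (it reads s[0] up front); B returns 0. — e.g. on solution(""): A raises IndexError, B returns 0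
import Mathlib
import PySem

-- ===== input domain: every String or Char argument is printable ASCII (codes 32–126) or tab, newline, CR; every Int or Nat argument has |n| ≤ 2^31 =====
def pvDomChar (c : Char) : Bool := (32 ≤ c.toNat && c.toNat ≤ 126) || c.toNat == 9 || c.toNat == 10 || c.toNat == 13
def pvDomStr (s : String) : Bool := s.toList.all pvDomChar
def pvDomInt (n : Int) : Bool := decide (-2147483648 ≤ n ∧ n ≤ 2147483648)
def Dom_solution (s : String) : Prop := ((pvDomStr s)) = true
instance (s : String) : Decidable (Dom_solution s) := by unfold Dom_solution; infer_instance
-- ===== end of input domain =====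

-- B replaces A's per-character sentinel balance scan by run-length encoding plus an arithmetic per-run scan (same cost, different algorithm).

-- ===== PORT A =====
-- one iteration of A's for-loop body on state (x, cnt0, cnt1, answer)
def stepA (st : Char × Int × Int × Int) (c : Char) : Char × Int × Int × Int :=
  let (x, c0, c1, ans) := st
  let (x, c0, c1) := if x = 'X' then (c, 0, 0) else (x, c0, c1)
  let (c0, c1) := if c ≠ x then (c0, c1 + 1) else (c0 + 1, c1)
  if c0 = c1 then ('X', c0, c1, ans + 1) else (x, c0, c1, ans)

def solution (s : String) : Int :=
  match s.toList with
  | [] => 0      -- Python raises IndexError at s[0] here; excluded by Pre_solution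
  | x0 :: rest =>
    let (x, _, _, ans) := rest.foldl stepA (x0, 1, 0, 0)
    ans + (if x ≠ 'X' then 1 else 0)

-- ===== PORT B =====
-- pass 1 of Source B: run-length encoding. runLen counts how many further copies
-- of c lead the list (the inner while loop) and returns the remainder.
def runLen (c : Char) : List Char → Nat × List Char
  | [] => (0, [])
  | d :: rest =>
    if d = c then ((runLen c rest).1 + 1, (runLen c rest).2)
    else (0, d :: rest)

theorem runLen_length (c : Char) : ∀ (l : List Char), (runLen c l).2.length ≤ l.length := by
  intro l
  induction l with
  | nil => simp [runLen]
  | cons d rest ih =>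
    by_cases h : d = c
    · simpa [runLen, h] using le_trans ih (Nat.le_succ _)
    · simp [runLen, h]

def rle : List Char → List (Char × Int)
  | [] => []
  | c :: rest => (c, ((runLen c rest).1 : Int) + 1) :: rle (runLen c rest).2
  termination_by l => l.length
  decreasing_by exact Nat.lt_succ_of_le (runLen_length c rest)

-- pass 2 of Source B: one arithmetic step per run on state (answer, bal, first)
def stepRuns (st : Int × Int × Option Char) (run : Char × Int) : Int × Int × Option Char :=
  let (ans, bal, first) := st
  let (ch, k) := run
  if bal = 0 then (ans, k, some ch)
  else if some ch = first then (ans, bal + k, first)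
  else if k < bal then (ans, bal - k, first)
  else if k > bal then (ans + 1, k - bal, some ch)
  else (ans + 1, 0, first)

def solution_alt (s : String) : Int :=
  let runs := rle s.toList
  let (ans, bal, _) := runs.foldl stepRuns (0, 0, (none : Option Char))
  ans + (if bal ≠ 0 then 1 else 0)

-- ===== PRECONDITION & SPEC =====
-- Pre_ excludes the empty string (A raises IndexError) and strings with 'X' at an even
-- index: A repurposes 'X' as an internal sentinel and segment starts only occur at even
-- indices, so a real 'X' there collides with the sentinel (the intended puzzle input has
-- no 'X'; this is the natural domain of A's encoding).
def Pre_solution (s : String) : Prop :=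
  s ≠ "" ∧ ∀ i : ℕ, i < s.toList.length → i % 2 = 0 → ¬ s.toList[i]? = some 'X'
instance (s : String) : Decidable (Pre_solution s) := by unfold Pre_solution; infer_instance

def pvWitness_solution : String := "banana"

-- On the empty string A raises IndexError (it reads s[0] up front); B returns 0.
def Raises_solution (s : String) : Prop := s = ""
instance (s : String) : Decidable (Raises_solution s) := by unfold Raises_solution; infer_instance
def pvRaiseWitness_solution : String := ""
def pvRaiseWitnessOut_solution : Int := 0

def Spec_solution (s : String) (out : Int) : Prop := out = solution_alt s
instance (s : String) (out : Int) : Decidable (Spec_solution s out) := by unfold Spec_solution; infer_instance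

-- ===== CLAIM (what is proved, stated in full; the proofs are below) =====
def Claim_equal_solution : Prop := ∀ (s : String), Dom_solution s → Pre_solution s → Spec_solution s (solution s)
def Claim_raises_solution : Prop := (∀ (s : String), Dom_solution s → Raises_solution s → ¬ Pre_solution s) ∧ (Dom_solution (pvRaiseWitness_solution) ∧ Raises_solution (pvRaiseWitness_solution) ∧ solution_alt (pvRaiseWitness_solution) = pvRaiseWitnessOut_solution)

-- ===== LEMMAS AND PROOFS =====

-- A's final answer computed from an intermediate loop state
def finishA (st : Char × Int × Int × Int) (l : List Char) : Int :=
  let (x, _, _, ans) := l.foldl stepA st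
  ans + (if x ≠ 'X' then 1 else 0)

theorem finishA_append (st : Char × Int × Int × Int) (a l : List Char) :
    finishA st (a ++ l) = finishA (a.foldl stepA st) l := by
  simp [finishA, List.foldl_append]

-- B's final answer computed from an intermediate run-scan state
def runScan (st : Int × Int × Option Char) (rs : List (Char × Int)) : Int :=
  let (ans, bal, _) := rs.foldl stepRuns st
  ans + (if bal ≠ 0 then 1 else 0)

-- 'X' does not occur in l at any index of parity p
def noXat (p : ℕ) (l : List Char) : Prop :=
  ∀ i : ℕ, i < l.length → i % 2 = p % 2 → ¬ l[i]? = some 'X'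

theorem noXat_congr (p q : ℕ) (l : List Char) (h : p % 2 = q % 2) (hp : noXat p l) :
    noXat q l := fun i hi hm => hp i hi (by omega)

theorem noXat_shift (p : ℕ) (c : Char) (l : List Char) (hp : noXat p (c :: l)) :
    noXat (p + 1) l := by
  intro i hi hm
  have h := hp (i + 1) (by simpa using Nat.succ_lt_succ hi) (by omega)
  simpa using h

theorem noXat_head (c : Char) (l : List Char) (hp : noXat 0 (c :: l)) : c ≠ 'X' := by
  have h := hp 0 (by simp) (by simp)
  simpa using h

theorem noXat_drop : ∀ (a : List Char) (p : ℕ) (l : List Char),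
    noXat p (a ++ l) → noXat (p + a.length) l := by
  intro a
  induction a with
  | nil => intro p l h; simpa using h
  | cons c a ih =>
    intro p l h
    have h1 : noXat (p + 1) (a ++ l) := noXat_shift p c (a ++ l) (by simpa using h)
    have h2 := ih (p + 1) l h1
    exact noXat_congr _ _ _ (by simp; omega) h2

-- ===== A-side behaviour on one whole run =====

theorem foldA_same (x : Char) (hx : x ≠ 'X') : ∀ (k : Nat) (c0 c1 ans : Int), c1 < c0 →
    List.foldl stepA (x, c0, c1, ans) (List.replicate k x) = (x, c0 + k, c1, ans) := by
  intro k
  induction k with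
  | zero => intro c0 c1 ans h; simp
  | succ k ih =>
    intro c0 c1 ans h
    have hstep : stepA (x, c0, c1, ans) x = (x, c0 + 1, c1, ans) := by
      simp [stepA, hx, show ¬(c0 + 1 = c1) by omega]
    rw [List.replicate_succ, List.foldl_cons, hstep, ih (c0 + 1) c1 ans (by omega)]
    simp only [Prod.mk.injEq, true_and, and_true]
    push_cast; ring

theorem foldA_diff (x c : Char) (hx : x ≠ 'X') (hc : c ≠ x) :
    ∀ (k : Nat) (c0 c1 ans : Int), c1 + k < c0 →
    List.foldl stepA (x, c0, c1, ans) (List.replicate k c) = (x, c0, c1 + k, ans) := by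
  intro k
  induction k with
  | zero => intro c0 c1 ans h; simp
  | succ k ih =>
    intro c0 c1 ans h
    have hstep : stepA (x, c0, c1, ans) c = (x, c0, c1 + 1, ans) := by
      simp [stepA, hx, hc, show ¬(c0 = c1 + 1) by omega]
    rw [List.replicate_succ, List.foldl_cons, hstep, ih c0 (c1 + 1) ans (by omega)]
    simp only [Prod.mk.injEq, true_and, and_true]
    push_cast; ring

theorem foldA_tie (x c : Char) (hx : x ≠ 'X') (hc : c ≠ x) :
    ∀ (k : Nat) (c0 c1 ans : Int), c1 + ((k : Int) + 1) = c0 →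
    List.foldl stepA (x, c0, c1, ans) (List.replicate (k + 1) c) = ('X', c0, c0, ans + 1) := by
  intro k
  induction k with
  | zero =>
    intro c0 c1 ans h
    have hstep : stepA (x, c0, c1, ans) c = ('X', c0, c1 + 1, ans + 1) := by
      simp [stepA, hx, hc, show c0 = c1 + 1 by omega]
    rw [List.replicate_succ, List.foldl_cons, hstep]
    simp [show c1 + 1 = c0 by omega]
  | succ k ih =>
    intro c0 c1 ans h
    have hstep : stepA (x, c0, c1, ans) c = (x, c0, c1 + 1, ans) := by
      simp [stepA, hx, hc, show ¬(c0 = c1 + 1) by omega]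
    rw [List.replicate_succ, List.foldl_cons, hstep, ih c0 (c1 + 1) ans (by omega)]

theorem foldA_reset (c : Char) (hc : c ≠ 'X') (k : Nat) (c0 c1 ans : Int) :
    List.foldl stepA ('X', c0, c1, ans) (List.replicate (k + 1) c) = (c, (k : Int) + 1, 0, ans) := by
  have hstep : stepA ('X', c0, c1, ans) c = (c, 1, 0, ans) := by
    simp [stepA]
  rw [List.replicate_succ, List.foldl_cons, hstep, foldA_same c hc k 1 0 ans (by omega)]
  simp only [Prod.mk.injEq, true_and, and_true]
  ring

-- decomposition of a list into its first run and the rest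
theorem runLen_spec (c : Char) : ∀ (l : List Char),
    l = List.replicate (runLen c l).1 c ++ (runLen c l).2 := by
  intro l
  induction l with
  | nil => simp [runLen]
  | cons d rest ih =>
    by_cases h : d = c
    · subst h; simpa [runLen, List.replicate_succ] using ih
    · simp [runLen, h]

-- ===== the core invariant: A's per-char scan equals B's per-run scan =====
-- Open state: A at (x, c0, c1) mid-segment corresponds to B at bal = c0 - c1, first = x.
-- Closed state: A at sentinel 'X' corresponds to B at bal = 0 (any remembered first).
theorem runScan_cons (st : Int × Int × Option Char) (run : Char × Int) (rs : List (Char × Int)) :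
    runScan st (run :: rs) = runScan (stepRuns st run) rs := rfl

theorem mainA : ∀ (n : Nat) (l : List Char), l.length ≤ n →
    (∀ (x : Char) (c0 c1 ans : Int), x ≠ 'X' → 0 ≤ c1 → c1 < c0 →
        noXat (c0 + c1).toNat l →
        finishA (x, c0, c1, ans) l = runScan (ans, c0 - c1, some x) (rle l)) ∧
    (∀ (c0 c1 ans : Int) (f : Option Char), noXat 0 l →
        finishA ('X', c0, c1, ans) l = runScan (ans, 0, f) (rle l)) := by
  intro n
  induction n with
  | zero =>
    intro l hl
    have hnil : l = [] := List.length_eq_zero_iff.mp (Nat.le_zero.mp hl)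
    subst hnil
    constructor
    · intro x c0 c1 ans hx h0 hlt _
      simp [finishA, runScan, rle, hx, show c0 - c1 ≠ 0 by omega]
    · intro c0 c1 ans f _
      simp [finishA, runScan, rle]
  | succ n ih =>
    intro l hl
    match l with
    | [] =>
      constructor
      · intro x c0 c1 ans hx h0 hlt _
        simp [finishA, runScan, rle, hx, show c0 - c1 ≠ 0 by omega]
      · intro c0 c1 ans f _
        simp [finishA, runScan, rle]
    | c :: rest =>
      have hk : rest = List.replicate (runLen c rest).1 c ++ (runLen c rest).2 :=
        runLen_spec c rest
      set k := (runLen c rest).1 with hkdef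
      set r := (runLen c rest).2 with hrdef
      have hsplit : c :: rest = List.replicate (k + 1) c ++ r := by
        rw [List.replicate_succ, List.cons_append]
        exact congrArg (c :: ·) hk
      have hrle : rle (c :: rest) = (c, (k : Int) + 1) :: rle r := by
        rw [rle]
      have hlenr : r.length ≤ n := by
        have h1 : r.length ≤ rest.length := runLen_length c rest
        have h2 : rest.length + 1 ≤ n + 1 := by simpa using hl
        omega
      obtain ⟨ihO, ihC⟩ := ih r hlenr
      have hcast : ((k + 1 : Nat) : Int) = (k : Int) + 1 := by push_cast; ring
      constructor
      · -- open state
        intro x c0 c1 ans hx h0 hlt hX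
        have hXr : noXat ((c0 + c1).toNat + (k + 1)) r := by
          have := noXat_drop (List.replicate (k + 1) c) ((c0 + c1).toNat) r
            (by rw [← hsplit]; exact hX)
          simpa using this
        rw [hrle, runScan_cons, hsplit, finishA_append]
        by_cases hcx : c = x
        · subst hcx
          rw [foldA_same c hx (k + 1) c0 c1 ans hlt, hcast]
          have hbal : stepRuns (ans, c0 - c1, some c) (c, (k : Int) + 1)
              = (ans, c0 - c1 + ((k : Int) + 1), some c) := by
            simp [stepRuns, show ¬(c0 - c1 = 0) by omega]
          rw [hbal]
          have hrec := ihO c (c0 + ((k : Int) + 1)) c1 ans hx h0 (by omega)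
            (noXat_congr _ _ _ (by omega) hXr)
          rw [hrec, show c0 + ((k : Int) + 1) - c1 = c0 - c1 + ((k : Int) + 1) by ring]
        · rcases lt_trichotomy ((k : Int) + 1) (c0 - c1) with hlt2 | heq2 | hgt2
          · -- run too short: stays open
            rw [foldA_diff x c hx hcx (k + 1) c0 c1 ans (by omega), hcast]
            have hbal : stepRuns (ans, c0 - c1, some x) (c, (k : Int) + 1)
                = (ans, c0 - c1 - ((k : Int) + 1), some x) := by
              simp [stepRuns, show ¬(c0 - c1 = 0) by omega, Option.some.injEq, hcx,
                show (k : Int) + 1 < c0 - c1 from hlt2]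
            rw [hbal]
            have hrec := ihO x c0 (c1 + ((k : Int) + 1)) ans hx (by omega) (by omega)
              (noXat_congr _ _ _ (by omega) hXr)
            rw [hrec, show c0 - (c1 + ((k : Int) + 1)) = c0 - c1 - ((k : Int) + 1) by ring]
          · -- run closes the segment exactly
            rw [foldA_tie x c hx hcx k c0 c1 ans (by omega)]
            have hbal : stepRuns (ans, c0 - c1, some x) (c, (k : Int) + 1)
                = (ans + 1, 0, some x) := by
              simp [stepRuns, show ¬(c0 - c1 = 0) by omega, Option.some.injEq, hcx,
                show ¬((k : Int) + 1 < c0 - c1) by omega,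
                show ¬(c0 - c1 < (k : Int) + 1) by omega]
            rw [hbal]
            exact ihC c0 c0 (ans + 1) (some x) (noXat_congr _ _ _ (by omega) hXr)
          · -- run closes the segment mid-run; leftover opens the next one
            set b := (c0 - c1).toNat with hbdef
            have hb1 : 1 ≤ b := by omega
            have hbk : b ≤ k := by omega
            have hcX : c ≠ 'X' := by
              intro hcEq
              have hbound : b < (c :: rest).length := by
                rw [hsplit]
                simp
                omega
              have hpar : b % 2 = ((c0 + c1).toNat) % 2 := by omega
              have hnx := hX b hbound hpar
              apply hnx
              rw [hsplit, List.getElem?_append_left (by simp; omega),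
                List.getElem?_replicate]
              simp [show b < k + 1 by omega, hcEq]
            have hchunk : List.replicate (k + 1) c
                = List.replicate b c ++ List.replicate (k + 1 - b) c := by
              rw [← List.replicate_add]
              congr 1
              omega
            rw [hchunk, List.foldl_append,
              show b = (b - 1) + 1 by omega,
              foldA_tie x c hx hcx (b - 1) c0 c1 ans (by omega),
              show k + 1 - ((b - 1) + 1) = (k - b) + 1 by omega,
              foldA_reset c hcX (k - b) c0 c0 (ans + 1)]
            have hbal : stepRuns (ans, c0 - c1, some x) (c, (k : Int) + 1)
                = (ans + 1, (k : Int) + 1 - (c0 - c1), some c) := by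
              simp [stepRuns, show ¬(c0 - c1 = 0) by omega, Option.some.injEq, hcx,
                show ¬((k : Int) + 1 < c0 - c1) by omega,
                show c0 - c1 < (k : Int) + 1 from hgt2]
            rw [hbal]
            have hrec := ihO c ((k - b : Nat) + 1) 0 (ans + 1) hcX le_rfl (by omega)
              (noXat_congr _ _ _ (by omega) hXr)
            rw [hrec, show ((k - b : Nat) : Int) + 1 - 0 = (k : Int) + 1 - (c0 - c1) by omega]
      · -- closed state
        intro c0 c1 ans f hX
        have hcX : c ≠ 'X' := noXat_head c rest hX
        have hXr : noXat (0 + (k + 1)) r := by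
          have := noXat_drop (List.replicate (k + 1) c) 0 r (by rw [← hsplit]; exact hX)
          simpa using this
        rw [hrle, runScan_cons, hsplit, finishA_append,
          foldA_reset c hcX k c0 c1 ans]
        have hbal : stepRuns (ans, 0, f) (c, (k : Int) + 1)
            = (ans, (k : Int) + 1, some c) := by
          simp [stepRuns]
        rw [hbal]
        have hrec := ihO c ((k : Int) + 1) 0 ans hcX le_rfl (by omega)
          (noXat_congr _ _ _ (by omega) hXr)
        rw [hrec, show ((k : Int) + 1) - 0 = (k : Int) + 1 by ring]

-- ===== VERDICT (by name: the statement is the Claim_ definition above) =====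
theorem solution_spec : Claim_equal_solution := by
  intro s _ hpre
  obtain ⟨hne, hXpre⟩ := hpre
  unfold Spec_solution
  cases hs : s.toList with
  | nil =>
    exact absurd (by simpa using congrArg String.ofList hs) hne
  | cons x0 rest =>
    have hX0 : noXat 0 (x0 :: rest) := by
      intro i hi hm
      have h := hXpre i (by rw [hs]; exact hi) (by omega)
      rw [hs] at h
      exact h
    have hstep : stepA ('X', 0, 0, 0) x0 = (x0, 1, 0, 0) := by
      simp [stepA]
    have h1 : solution s = finishA ('X', 0, 0, 0) (x0 :: rest) := by
      simp [solution, hs, finishA, hstep]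
    have h2 : solution_alt s = runScan (0, 0, none) (rle (x0 :: rest)) := by
      simp [solution_alt, runScan, hs]
    rw [h1, h2]
    exact (mainA (x0 :: rest).length (x0 :: rest) le_rfl).2 0 0 0 none hX0

@[simp] theorem solution_raises : Claim_raises_solution := by
  unfold Claim_raises_solution
  refine ⟨fun s _ hr hp => hp.1 hr, by decide, by decide, ?_⟩
  show solution_alt "" = 0
  simp [solution_alt, rle, String.toList_empty]
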